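-- pv_equiv track=rewrite | github.com/ashwinhprasad/DataStructures-and-Algorithms | Algorithms/Backtracking/sudoku.py | recurr
-- ===== SOURCE A (Python) =====
-- def is_valid(game_mat):
--     for i in range(4):
--         dup_row = []
--         dup_col = []
--         for j in range(4):
--
--             if game_mat[i][j] != 0:
--                 if game_mat[i][j] not in dup_row:
--                     dup_row.append(game_mat[i][j])
--                 else:
--                     return 0
--
--             if game_mat[j][i] != 0:
--                 if game_mat[j][i] not in dup_col:
--                     dup_col.append(game_mat[j][i])
--                 else:
--                     return 0
--     return 1
--
-- def recurr(mat,m,n):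
--
--     # exit condition
--     if m==4:
--         return 1
--
--     # not valid
--     if not is_valid(mat):
--         return 0
--
--
--     if mat[m][n] == 0:
--
--         # list of all possibilities at a point
--         for i in range(1,10):
--
--             # pursue a possibility
--             mat[m][n] = i
--
--             # recurr
--             if n == 3:
--                 if recurr(mat,m+1,0):
--                     return 1
--             else:
--                 if recurr(mat,m,n+1):
--                     return 1
--
--             # backtrack
--             mat[m][n] = 0
--     else:
--         if n == 3:
--             if recurr(mat,m+1,0):
--                 return 1
--         else:
--             if recurr(mat,m,n+1):
--                 return 1
-- ===== SOURCE B (Python) =====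
-- # B: no backtracking search.  With digits 1..9 and only row/column-duplicate
-- # constraints on a 4x4 grid, an empty cell has at most 6 forbidden values among
-- # 9 candidates, so every board that passes the duplicate check is completable:
-- # the backtracker succeeds exactly when the board has no duplicate non-zero
-- # value in any of the first four rows/columns (and returns 1 unconditionally
-- # at m == 4).  B materialises the 8 lines once and tests each for duplicates.
-- # Equivalence is about the return value only: A fills `mat` in place with a
-- # solution, B never mutates `mat`.
--
-- def _distinct(vals):
--     if not vals:
--         return True
--     return vals[0] not in vals[1:] and _distinct(vals[1:])
--
-- def recurr(mat, m, n):
--     if m == 4: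
--         return 1
--     rows = [[mat[i][j] for j in range(4)] for i in range(4)]
--     cols = [[mat[i][j] for i in range(4)] for j in range(4)]
--     for line in rows + cols:
--         if not _distinct([v for v in line if v != 0]):
--             return 0
--     return 1
-- ===== Notes on version B (the rewrite author's own statement) =====
-- stated objective: simpler
-- what changed: Replaced the recursive backtracking search by a duplicate check over the 8 row/column lines: with digits 1..9 and only row/column-duplicate constraints on a 4x4 grid, an empty cell has at most 6 forbidden values, so every duplicate-free board is completable and the backtracker returns 1 exactly when the board is duplicate-free (and 1 unconditionally at m==4); B does not mutate mat, A fills it with a solution in place.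
-- outside the precondition, e.g. on recurr([[3, 2, 9], [6], [3, 11], [-2, 183]], -1, 11): A returns 0, B raises IndexError; on recurr([[0, 0, 0, 0], [0, 0, 0, 0], [0, 0, 0, 0], [0, 0, 0, 0]], -4, 0): A returns 1, B returns 1; on recurr([[1, 0, 0, 0], [0, 0, 0, 0], [0, 0, 0, 0], [0, 0, 0, 0]], 0, -1): A returns 1, B returns 1
import Mathlib
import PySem

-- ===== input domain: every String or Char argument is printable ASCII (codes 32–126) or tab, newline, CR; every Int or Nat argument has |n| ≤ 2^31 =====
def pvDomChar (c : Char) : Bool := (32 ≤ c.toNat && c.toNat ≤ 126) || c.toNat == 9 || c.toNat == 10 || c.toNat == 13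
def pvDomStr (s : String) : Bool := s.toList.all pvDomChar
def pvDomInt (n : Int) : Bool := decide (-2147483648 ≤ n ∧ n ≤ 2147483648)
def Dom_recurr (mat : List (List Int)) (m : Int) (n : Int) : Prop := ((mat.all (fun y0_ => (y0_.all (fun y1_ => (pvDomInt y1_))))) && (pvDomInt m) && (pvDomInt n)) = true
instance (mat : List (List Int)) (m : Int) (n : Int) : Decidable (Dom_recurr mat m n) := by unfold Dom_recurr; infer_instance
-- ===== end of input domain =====

-- B replaces A's backtracking search by a single duplicate check over the 8 row/column
-- lines (every duplicate-free board is completable); equivalence is about the return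
-- value only — A fills `mat` in place, B does not.

-- ===== PORT A =====
-- mat[i][j] reads/writes: Python raises IndexError when a subscript is out of range;
-- Pre_recurr keeps every subscript that is actually reached in range, so the `.getD`
-- defaults of the total PySem forms below are never used on admitted inputs.
def pyCell (mat : List (List Int)) (i j : Int) : Int :=
  PySem.List.pyGetD (PySem.List.pyGetD mat i []) j 0

def pySetCell (mat : List (List Int)) (i j v : Int) : List (List Int) :=
  PySem.List.pySetD mat i (PySem.List.pySetD (PySem.List.pyGetD mat i []) j v)

-- is_valid's inner j-loop with its dup_row/dup_col accumulators and early `return 0`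
def isValidJ (mat : List (List Int)) (i : Int) (js : List Int) (dupRow dupCol : List Int) : Bool :=
  match js with
  | [] => true
  | j :: js' =>
    let a := pyCell mat i j
    if a ≠ 0 ∧ a ∈ dupRow then false
    else
      let dupRow' := if a ≠ 0 then dupRow ++ [a] else dupRow
      let b := pyCell mat j i
      if b ≠ 0 ∧ b ∈ dupCol then false
      else
        let dupCol' := if b ≠ 0 then dupCol ++ [b] else dupCol
        isValidJ mat i js' dupRow' dupCol'

-- is_valid's outer i-loop
def isValidI (mat : List (List Int)) (is_ : List Int) : Bool :=
  match is_ with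
  | [] => true
  | i :: rest =>
    if isValidJ mat i (PySem.List.pyRange 0 4 1) [] [] then isValidI mat rest else false

def is_valid (mat : List (List Int)) : Int :=
  if isValidI mat (PySem.List.pyRange 0 4 1) then 1 else 0

-- recurr: the recursion is totalized with a fuel bounding only the recursion DEPTH
-- (at most 17 on admitted inputs, so fuel 64 never changes the value there).
-- Python's fall-through `return None` is falsy at every call site and is encoded as 0.
mutual
def recurrF (fuel : Nat) (mat : List (List Int)) (m : Int) (n : Int) : Int :=
  match fuel with
  | 0 => 0
  | fuel' + 1 =>
    if m = 4 then 1
    else if is_valid mat = 0 then 0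
    else if pyCell mat m n = 0 then
      tryLoop fuel' mat m n (PySem.List.pyRange 1 10 1)
    else
      if n = 3 then (if recurrF fuel' mat (m + 1) 0 ≠ 0 then 1 else 0)
      else (if recurrF fuel' mat m (n + 1) ≠ 0 then 1 else 0)
  termination_by (fuel, 0)

-- the `for i in range(1, 10)` loop: place i, recurse, backtrack by resetting to 0
def tryLoop (fuel : Nat) (mat : List (List Int)) (m : Int) (n : Int) (l : List Int) : Int :=
  match l with
  | [] => 0
  | i :: rest =>
    let mat' := pySetCell mat m n i
    let r := if n = 3 then recurrF fuel mat' (m + 1) 0 else recurrF fuel mat' m (n + 1)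
    if r ≠ 0 then 1 else tryLoop fuel (pySetCell mat' m n 0) m n rest
  termination_by (fuel, l.length + 1)
end

def recurr (mat : List (List Int)) (m : Int) (n : Int) : Int :=
  recurrF 64 mat m n

-- ===== PORT B =====
-- Source B's _distinct: vals[0] not in vals[1:] and _distinct(vals[1:])
def distinctB : List Int → Bool
  | [] => true
  | v :: vs => (!(vs.contains v)) && distinctB vs

-- Source B's element read mat[i][j] (i, j ∈ 0..3, nonnegative)
def cellB (mat : List (List Int)) (i j : Nat) : Int :=
  PySem.List.pyGetD (PySem.List.pyGetD mat (i : Int) []) (j : Int) 0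

-- rows + cols, the 8 lines Source B builds with its two comprehensions
def linesB (mat : List (List Int)) : List (List Int) :=
  ((List.range 4).map fun i => (List.range 4).map fun j => cellB mat i j) ++
  ((List.range 4).map fun j => (List.range 4).map fun i => cellB mat i j)

-- the `for line in rows + cols` loop with its early `return 0`
def checkLines : List (List Int) → Int
  | [] => 1
  | line :: rest =>
    if !(distinctB (line.filter (fun v => v != 0))) then 0 else checkLines rest

def recurr_alt (mat : List (List Int)) (m : Int) (n : Int) : Int :=
  if m = 4 then 1 else checkLines (linesB mat)

-- ===== PRECONDITION & SPEC =====
-- Closed-form readers of the board used only by Pre_ (independent of the ports).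
def cellD (mat : List (List Int)) (i j : Nat) : Int := (mat.getD i []).getD j 0
def rowVals (mat : List (List Int)) (i : Nat) : List Int :=
  [cellD mat i 0, cellD mat i 1, cellD mat i 2, cellD mat i 3]
def colVals (mat : List (List Int)) (j : Nat) : List Int :=
  [cellD mat 0 j, cellD mat 1 j, cellD mat 2 j, cellD mat 3 j]
-- no duplicate non-zero value in any of the first four rows/columns (what is_valid checks)
def validBoard (mat : List (List Int)) : Prop :=
  ∀ k ∈ [0, 1, 2, 3], ((rowVals mat k).filter (fun v => v != 0)).Nodup ∧
    ((colVals mat k).filter (fun v => v != 0)).Nodup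
-- a 4×4 board (possibly with extra rows/columns, which A never touches)
def shape4 (mat : List (List Int)) : Prop :=
  4 ≤ mat.length ∧ ∀ k, k < 4 → 4 ≤ (mat.getD k []).length

-- Pre_ excludes inputs where A raises IndexError (boards without a 4×4 prefix reached by the
-- scan, or cell subscripts outside 0..4 × 0..3 on a board that is still valid), inputs where
-- A's early duplicate exit returns 0 on a malformed board that B's full 4×4 read cannot accept
-- (B raises IndexError there), and inputs where
-- Python's negative-index wraparound makes A revisit cells in an accidental order (negative m or
-- n; A happens to return the same value as B there, see the cited examples).
def Pre_recurr (mat : List (List Int)) (m : Int) (n : Int) : Prop :=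
  m = 4 ∨ (shape4 mat ∧ (¬ validBoard mat ∨ (0 ≤ m ∧ m ≤ 3 ∧ 0 ≤ n ∧ n ≤ 3)))
instance (mat : List (List Int)) (m : Int) (n : Int) : Decidable (Pre_recurr mat m n) := by
  unfold Pre_recurr shape4 validBoard; infer_instance

def pvWitness_recurr : List (List Int) × Int × Int :=
  ([[1, 2, 3, 4], [0, 0, 0, 0], [2, 0, 0, 0], [0, 0, 0, 0]], 0, 0)

def Spec_recurr (mat : List (List Int)) (m : Int) (n : Int) (out : Int) : Prop := out = recurr_alt mat m n
instance (mat : List (List Int)) (m : Int) (n : Int) (out : Int) : Decidable (Spec_recurr mat m n out) := by unfold Spec_recurr; infer_instance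

-- ===== CLAIM (what is proved, stated in full; the proofs are below) =====
def Claim_equal_recurr : Prop := ∀ (mat : List (List Int)) (m : Int) (n : Int), Dom_recurr mat m n → Pre_recurr mat m n → Spec_recurr mat m n (recurr mat m n)

-- ===== LEMMAS AND PROOFS =====

theorem rng04 : PySem.List.pyRange 0 4 1 = [0, 1, 2, 3] := by decide

-- one duplicate scan (is_valid's dup_row and dup_col are two independent instances of it)
def scanOk (d : List Int) : List Int → Bool
  | [] => true
  | v :: vs =>
    if v ≠ 0 ∧ v ∈ d then false else scanOk (if v ≠ 0 then d ++ [v] else d) vs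

theorem isValidJ_eq_scan (mat : List (List Int)) (i : Int) :
    ∀ (js dr dc : List Int),
      isValidJ mat i js dr dc =
        (scanOk dr (js.map (fun j => pyCell mat i j)) &&
          scanOk dc (js.map (fun j => pyCell mat j i))) := by
  intro js
  induction js with
  | nil => intro dr dc; simp [isValidJ, scanOk]
  | cons j js ih =>
    intro dr dc
    by_cases h1 : pyCell mat i j ≠ 0 ∧ pyCell mat i j ∈ dr
    · simp [isValidJ, scanOk, h1]
    · by_cases h2 : pyCell mat j i ≠ 0 ∧ pyCell mat j i ∈ dc
      · simp [isValidJ, scanOk, h1, h2]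
      · simp [isValidJ, scanOk, h1, h2, ih]

theorem scanOk_iff :
    ∀ (vs d : List Int), d.Nodup →
      (scanOk d vs = true ↔ (d ++ vs.filter (fun v => v != 0)).Nodup) := by
  intro vs
  induction vs with
  | nil => intro d hd; simpa [scanOk] using hd
  | cons v vs ih =>
    intro d hd
    by_cases hv : v = 0
    · subst hv; simpa [scanOk, List.filter_cons] using ih d hd
    · have hfc : (v :: vs).filter (fun v => v != 0) = v :: vs.filter (fun v => v != 0) := by
        simp [List.filter_cons, hv]
      by_cases hm : v ∈ d
      · have hstep : scanOk d (v :: vs) = false := by simp [scanOk, hv, hm]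
        rw [hstep, hfc]
        simp only [Bool.false_eq_true, false_iff]
        intro h
        rw [List.nodup_middle, List.nodup_cons] at h
        exact h.1 (List.mem_append_left _ hm)
      · have hd' : (d ++ [v]).Nodup := by
          rw [show d ++ [v] = d ++ v :: [] from rfl, List.nodup_middle]
          simp [hd, hm]
        have hstep : scanOk d (v :: vs) = scanOk (d ++ [v]) vs := by
          simp [scanOk, hv, hm]
        rw [hstep, ih (d ++ [v]) hd', hfc, List.append_assoc]
        simp

theorem pyCell_num (mat : List (List Int)) (i j : Nat) :
    pyCell mat (i : Int) (j : Int) = cellD mat i j := by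
  simp [pyCell, cellD]

theorem isValidJ_num (mat : List (List Int)) (k : Nat) :
    (isValidJ mat (k : Int) (PySem.List.pyRange 0 4 1) [] [] = true) ↔
      ((rowVals mat k).filter (fun v => v != 0)).Nodup ∧
        ((colVals mat k).filter (fun v => v != 0)).Nodup := by
  rw [isValidJ_eq_scan, rng04]
  have c0 : (0 : Int) = ((0 : Nat) : Int) := rfl
  have c1 : (1 : Int) = ((1 : Nat) : Int) := rfl
  have c2 : (2 : Int) = ((2 : Nat) : Int) := rfl
  have c3 : (3 : Int) = ((3 : Nat) : Int) := rfl
  simp only [List.map_cons, List.map_nil]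
  rw [show pyCell mat (↑k) 0 = cellD mat k 0 from by rw [c0, pyCell_num],
      show pyCell mat (↑k) 1 = cellD mat k 1 from by rw [c1, pyCell_num],
      show pyCell mat (↑k) 2 = cellD mat k 2 from by rw [c2, pyCell_num],
      show pyCell mat (↑k) 3 = cellD mat k 3 from by rw [c3, pyCell_num],
      show pyCell mat 0 (↑k) = cellD mat 0 k from by rw [c0, pyCell_num],
      show pyCell mat 1 (↑k) = cellD mat 1 k from by rw [c1, pyCell_num],
      show pyCell mat 2 (↑k) = cellD mat 2 k from by rw [c2, pyCell_num],
      show pyCell mat 3 (↑k) = cellD mat 3 k from by rw [c3, pyCell_num]]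
  rw [Bool.and_eq_true, scanOk_iff _ [] List.nodup_nil, scanOk_iff _ [] List.nodup_nil]
  simp [rowVals, colVals]

theorem isValid_eq_one_iff (mat : List (List Int)) :
    is_valid mat = 1 ↔ validBoard mat := by
  have hI : ∀ l : List Int, isValidI mat l = true ↔
      ∀ i ∈ l, isValidJ mat i (PySem.List.pyRange 0 4 1) [] [] = true := by
    intro l
    induction l with
    | nil => simp [isValidI]
    | cons i l ih =>
      by_cases h : isValidJ mat i (PySem.List.pyRange 0 4 1) [] [] = true
      · simp [isValidI, h, ih]
      · simp [isValidI, h]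
  have hiff : isValidI mat (PySem.List.pyRange 0 4 1) = true ↔ validBoard mat := by
    rw [hI, rng04]
    unfold validBoard
    constructor
    · intro h k hk
      fin_cases hk
      · exact (isValidJ_num mat 0).1 (h 0 (by simp))
      · exact (isValidJ_num mat 1).1 (h 1 (by simp))
      · exact (isValidJ_num mat 2).1 (h 2 (by simp))
      · exact (isValidJ_num mat 3).1 (h 3 (by simp))
    · intro h i hi
      fin_cases hi
      · exact (isValidJ_num mat 0).2 (h 0 (by simp))
      · exact (isValidJ_num mat 1).2 (h 1 (by simp))
      · exact (isValidJ_num mat 2).2 (h 2 (by simp))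
      · exact (isValidJ_num mat 3).2 (h 3 (by simp))
  unfold is_valid
  split
  · simpa [*] using hiff
  · simp only [show (0 : Int) ≠ 1 from by decide, false_iff]
    rw [← hiff]
    simp_all

theorem isValid_eq_zero (mat : List (List Int)) (h : ¬ validBoard mat) :
    is_valid mat = 0 := by
  unfold is_valid
  split
  · exact absurd ((isValid_eq_one_iff mat).mp (by unfold is_valid; simp [*])) h
  · rfl

theorem getD_set_self {α : Type} (L : List α) (k : Nat) (r d : α) (h : k < L.length) :
    (L.set k r).getD k d = r := by
  rw [List.getD_eq_getElem?_getD, List.getElem?_set_self h, Option.getD_some]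

theorem getD_set_ne {α : Type} (L : List α) (k k' : Nat) (r d : α) (h : k ≠ k') :
    (L.set k r).getD k' d = L.getD k' d := by
  rw [List.getD_eq_getElem?_getD, List.getElem?_set_ne h, ← List.getD_eq_getElem?_getD]

theorem pySetCell_natCast (mat : List (List Int)) (mN nN : Nat) (v : Int) :
    pySetCell mat (mN : Int) (nN : Int) v = mat.set mN ((mat.getD mN []).set nN v) := by
  simp [pySetCell]

theorem cellD_pySetCell (mat : List (List Int)) (mN nN : Nat)
    (hm : mN < mat.length) (hn : nN < (mat.getD mN []).length) (v : Int) (i j : Nat) :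
    cellD (pySetCell mat (mN : Int) (nN : Int) v) i j =
      if i = mN ∧ j = nN then v else cellD mat i j := by
  rw [pySetCell_natCast]
  unfold cellD
  by_cases hi : i = mN
  · subst hi
    rw [getD_set_self _ _ _ _ hm]
    by_cases hj : j = nN
    · subst hj
      rw [getD_set_self _ _ _ _ hn]
      simp
    · rw [getD_set_ne _ _ _ _ _ (fun h => hj h.symm)]
      simp [hj]
  · rw [getD_set_ne _ _ _ _ _ (fun h => hi h.symm)]
    simp [hi]

theorem shape4_pySetCell (mat : List (List Int)) (mN nN : Nat) (v : Int) (hs : shape4 mat) :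
    shape4 (pySetCell mat (mN : Int) (nN : Int) v) := by
  rw [pySetCell_natCast]
  obtain ⟨h1, h2⟩ := hs
  refine ⟨by simpa using h1, fun k hk => ?_⟩
  by_cases hkm : k = mN
  · subst hkm
    have hklen : k < mat.length := by omega
    rw [getD_set_self _ _ _ _ hklen, List.length_set]
    exact h2 k hk
  · rw [getD_set_ne _ _ _ _ _ (fun h => hkm h.symm)]
    exact h2 k hk

theorem pySetCell_reset (mat : List (List Int)) (mN nN : Nat)
    (hm : mN < mat.length) (hn : nN < (mat.getD mN []).length)
    (hc : cellD mat mN nN = 0) (i : Int) :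
    pySetCell (pySetCell mat (mN : Int) (nN : Int) i) (mN : Int) (nN : Int) 0 = mat := by
  rw [pySetCell_natCast, pySetCell_natCast]
  rw [getD_set_self _ _ _ _ hm, List.set_set, List.set_set]
  have h0 : (mat.getD mN [])[nN] = 0 := by
    unfold cellD at hc
    rw [List.getD_eq_getElem?_getD, List.getElem?_eq_getElem hn, Option.getD_some] at hc
    exact hc
  have hrow0 : (mat.getD mN []).set nN 0 = mat.getD mN [] := by
    rw [← h0]; exact List.set_getElem_self hn
  rw [hrow0]
  have hmm : mat.getD mN [] = mat[mN] := by
    rw [List.getD_eq_getElem?_getD, List.getElem?_eq_getElem hm, Option.getD_some]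
  rw [hmm]
  exact List.set_getElem_self hm

theorem rowVals_getElem (mat : List (List Int)) (mN nN : Nat) (hn4 : nN < 4) :
    (rowVals mat mN)[nN]'(by simp [rowVals]; omega) = cellD mat mN nN := by
  interval_cases nN <;> simp [rowVals]

theorem colVals_getElem (mat : List (List Int)) (mN nN : Nat) (hm4 : mN < 4) :
    (colVals mat nN)[mN]'(by simp [colVals]; omega) = cellD mat mN nN := by
  interval_cases mN <;> simp [colVals]

theorem rowVals_pySetCell_ne (mat : List (List Int)) (mN nN : Nat)
    (hm : mN < mat.length) (hn : nN < (mat.getD mN []).length) (v : Int) (k : Nat)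
    (hk : k ≠ mN) :
    rowVals (pySetCell mat (mN : Int) (nN : Int) v) k = rowVals mat k := by
  simp [rowVals, cellD_pySetCell mat mN nN hm hn, hk]

theorem rowVals_pySetCell_eq (mat : List (List Int)) (mN nN : Nat)
    (hm : mN < mat.length) (hn : nN < (mat.getD mN []).length) (hn4 : nN < 4) (v : Int) :
    rowVals (pySetCell mat (mN : Int) (nN : Int) v) mN = (rowVals mat mN).set nN v := by
  apply List.ext_getElem
  · simp [rowVals]
  · intro k hk1 hk2
    have hk4 : k < 4 := by simpa [rowVals] using hk1
    rw [rowVals_getElem _ mN k hk4, cellD_pySetCell mat mN nN hm hn v mN k]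
    by_cases hkn : k = nN
    · subst hkn
      rw [if_pos ⟨rfl, rfl⟩, List.getElem_set_self]
    · rw [if_neg (by tauto), List.getElem_set_ne (fun h => hkn h.symm),
        rowVals_getElem _ mN k hk4]

theorem colVals_pySetCell_ne (mat : List (List Int)) (mN nN : Nat)
    (hm : mN < mat.length) (hn : nN < (mat.getD mN []).length) (v : Int) (k : Nat)
    (hk : k ≠ nN) :
    colVals (pySetCell mat (mN : Int) (nN : Int) v) k = colVals mat k := by
  simp [colVals, cellD_pySetCell mat mN nN hm hn, hk]

theorem colVals_pySetCell_eq (mat : List (List Int)) (mN nN : Nat)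
    (hm : mN < mat.length) (hn : nN < (mat.getD mN []).length) (hm4 : mN < 4) (v : Int) :
    colVals (pySetCell mat (mN : Int) (nN : Int) v) nN = (colVals mat nN).set mN v := by
  apply List.ext_getElem
  · simp [colVals]
  · intro k hk1 hk2
    have hk4 : k < 4 := by simpa [colVals] using hk1
    rw [colVals_getElem _ k nN hk4, cellD_pySetCell mat mN nN hm hn v k nN]
    by_cases hkm : k = mN
    · subst hkm
      rw [if_pos ⟨rfl, rfl⟩, List.getElem_set_self]
    · rw [if_neg (by tauto), List.getElem_set_ne (fun h => hkm h.symm),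
        colVals_getElem _ k nN hk4]

theorem nodup_filter_set (l : List Int) (k : Nat) (hk : k < l.length) (h0 : l[k] = 0)
    (i : Int) (hi0 : i ≠ 0) (him : i ∉ l) (h : (l.filter (fun v => v != 0)).Nodup) :
    ((l.set k i).filter (fun v => v != 0)).Nodup := by
  have hdec : l = l.take k ++ l[k] :: l.drop (k + 1) := by
    conv_lhs => rw [← List.take_append_drop k l, List.drop_eq_getElem_cons hk]
  rw [List.set_eq_take_cons_drop i hk, List.filter_append, List.filter_cons,
    if_pos (by simp [hi0])]
  rw [List.nodup_middle, List.nodup_cons]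
  constructor
  · intro hmem
    rcases List.mem_append.mp hmem with hmem | hmem
    · exact him (List.take_subset _ _ (List.mem_of_mem_filter hmem))
    · exact him (List.drop_subset _ _ (List.mem_of_mem_filter hmem))
  · have hh : l.filter (fun v => v != 0) =
        (l.take k).filter (fun v => v != 0) ++
          ((l[k] :: l.drop (k + 1)).filter (fun v => v != 0)) := by
      conv_lhs => rw [hdec]
      rw [List.filter_append]
    rw [hh, h0, List.filter_cons, if_neg (by simp)] at h
    exact h

theorem exists_fresh (F : List Int) (h : F.length ≤ 8) :
    ∃ i, i ∈ PySem.List.pyRange 1 10 1 ∧ i ∉ F := by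
  by_contra hc
  push_neg at hc
  have hsub : PySem.List.pyRange 1 10 1 ⊆ F := fun x hx => hc x hx
  have hnd : (PySem.List.pyRange 1 10 1).Nodup := by decide
  have hlen := (List.subperm_of_subset hnd hsub).length_le
  rw [show (PySem.List.pyRange 1 10 1).length = 9 from by decide] at hlen
  omega

theorem exists_good (mat : List (List Int)) (mN nN : Nat)
    (hs : shape4 mat) (hv : validBoard mat) (hm4 : mN < 4) (hn4 : nN < 4)
    (hc : cellD mat mN nN = 0) :
    ∃ i ∈ PySem.List.pyRange 1 10 1,
      validBoard (pySetCell mat (mN : Int) (nN : Int) i) ∧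
        shape4 (pySetCell mat (mN : Int) (nN : Int) i) := by
  obtain ⟨hlen, hrows⟩ := hs
  have hm : mN < mat.length := by omega
  have hn : nN < (mat.getD mN []).length := by have := hrows mN hm4; omega
  obtain ⟨i, hi, hiF⟩ := exists_fresh (rowVals mat mN ++ colVals mat nN)
    (by simp [rowVals, colVals])
  have hi0 : i ≠ 0 := by
    have := PySem.List.mem_pyRange_one.mp hi
    omega
  have hirow : i ∉ rowVals mat mN := fun h => hiF (List.mem_append_left _ h)
  have hicol : i ∉ colVals mat nN := fun h => hiF (List.mem_append_right _ h)
  refine ⟨i, hi, fun k hk => ?_, shape4_pySetCell mat mN nN i ⟨hlen, hrows⟩⟩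
  constructor
  · by_cases hkm : k = mN
    · subst hkm
      rw [rowVals_pySetCell_eq mat k nN hm hn hn4 i]
      exact nodup_filter_set _ nN (by simp [rowVals]; omega)
        (by rw [rowVals_getElem mat k nN hn4]; exact hc) i hi0 hirow (hv k hk).1
    · rw [rowVals_pySetCell_ne mat mN nN hm hn i k hkm]
      exact (hv k hk).1
  · by_cases hkn : k = nN
    · subst hkn
      rw [colVals_pySetCell_eq mat mN k hm hn hm4 i]
      exact nodup_filter_set _ mN (by simp [colVals]; omega)
        (by rw [colVals_getElem mat mN k hm4]; exact hc) i hi0 hicol (hv k hk).2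
    · rw [colVals_pySetCell_ne mat mN nN hm hn i k hkn]
      exact (hv k hk).2

def nextCall (fuel : Nat) (mat : List (List Int)) (m n : Int) : Int :=
  if n = 3 then recurrF fuel mat (m + 1) 0 else recurrF fuel mat m (n + 1)

theorem tryLoop_eq_one (fuel : Nat) (mat : List (List Int)) (m n : Int)
    (hreset : ∀ i : Int, pySetCell (pySetCell mat m n i) m n 0 = mat) :
    ∀ l : List Int, (∃ i ∈ l, nextCall fuel (pySetCell mat m n i) m n = 1) →
      tryLoop fuel mat m n l = 1 := by
  intro l
  induction l with
  | nil => rintro ⟨i, hi, _⟩; cases hi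
  | cons i rest ih =>
    rintro ⟨j, hj, hcall⟩
    simp only [tryLoop]
    rcases List.mem_cons.mp hj with rfl | hj'
    · rw [show (if n = 3 then recurrF fuel (pySetCell mat m n j) (m + 1) 0
          else recurrF fuel (pySetCell mat m n j) m (n + 1)) =
          nextCall fuel (pySetCell mat m n j) m n from rfl, hcall]
      simp
    · by_cases hr : (if n = 3 then recurrF fuel (pySetCell mat m n i) (m + 1) 0
          else recurrF fuel (pySetCell mat m n i) m (n + 1)) ≠ 0
      · rw [if_pos hr]
      · rw [if_neg hr, hreset i]
        exact ih ⟨j, hj', hcall⟩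

theorem main (fuel : Nat) :
    ∀ (mat : List (List Int)) (m n : Int), shape4 mat → validBoard mat →
      0 ≤ m → m ≤ 4 → 0 ≤ n → n ≤ 3 → 16 - 4 * m - n < (fuel : Int) → 1 ≤ fuel →
      recurrF fuel mat m n = 1 := by
  induction fuel with
  | zero => intro mat m n _ _ _ _ _ _ _ h; omega
  | succ f ih =>
    intro mat m n hs hv hm0 hm4 hn0 hn3 hμ _
    by_cases hm : m = 4
    · simp [recurrF, hm]
    · have hm3 : m ≤ 3 := by omega
      have hval1 : is_valid mat = 1 := (isValid_eq_one_iff mat).mpr hv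
      have hvalne : ¬ is_valid mat = 0 := by rw [hval1]; decide
      obtain ⟨mN, rfl⟩ : ∃ mN : Nat, m = (mN : Int) := ⟨m.toNat, (Int.toNat_of_nonneg hm0).symm⟩
      obtain ⟨nN, rfl⟩ : ∃ nN : Nat, n = (nN : Int) := ⟨n.toNat, (Int.toNat_of_nonneg hn0).symm⟩
      have hm4N : mN < 4 := by omega
      have hn4N : nN < 4 := by omega
      have hf1 : 1 ≤ f := by omega
      have hnext : ∀ mat', shape4 mat' → validBoard mat' →
          nextCall f mat' (mN : Int) (nN : Int) = 1 := by
        intro mat' hs' hv'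
        unfold nextCall
        by_cases h3 : (nN : Int) = 3
        · rw [if_pos h3]
          exact ih mat' _ _ hs' hv' (by omega) (by omega) (by omega) (by omega)
            (by omega) hf1
        · rw [if_neg h3]
          exact ih mat' _ _ hs' hv' (by omega) (by omega) (by omega) (by omega)
            (by omega) hf1
      have hmlen : mN < mat.length := by have := hs.1; omega
      have hnlen : nN < (mat.getD mN []).length := by have := hs.2 mN hm4N; omega
      by_cases hcell : pyCell mat (mN : Int) (nN : Int) = 0
      · have hcD : cellD mat mN nN = 0 := by rw [← pyCell_num]; exact hcell
        obtain ⟨i, hi, hv', hs'⟩ := exists_good mat mN nN hs hv hm4N hn4N hcD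
        have hreset : ∀ j : Int,
            pySetCell (pySetCell mat (mN : Int) (nN : Int) j) (mN : Int) (nN : Int) 0 = mat :=
          fun j => pySetCell_reset mat mN nN hmlen hnlen hcD j
        have hloop := tryLoop_eq_one f mat (mN : Int) (nN : Int) hreset
          (PySem.List.pyRange 1 10 1) ⟨i, hi, hnext _ hs' hv'⟩
        simp only [recurrF, if_neg hm, if_neg hvalne, if_pos hcell]
        exact hloop
      · have h1 := hnext mat hs hv
        simp only [recurrF, if_neg hm, if_neg hvalne, if_neg hcell]
        unfold nextCall at h1
        by_cases h3 : (nN : Int) = 3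
        · rw [if_pos h3] at h1 ⊢
          rw [h1]
          simp
        · rw [if_neg h3] at h1 ⊢
          rw [h1]
          simp

-- ===== B-side lemmas =====
theorem distinctB_iff (l : List Int) : distinctB l = true ↔ l.Nodup := by
  induction l with
  | nil => simp [distinctB]
  | cons v vs ih => simp [distinctB, List.nodup_cons, ih]

theorem cellB_eq (mat : List (List Int)) (i j : Nat) : cellB mat i j = cellD mat i j := by
  simp [cellB, cellD]

theorem linesB_eq (mat : List (List Int)) :
    linesB mat = [rowVals mat 0, rowVals mat 1, rowVals mat 2, rowVals mat 3,
                  colVals mat 0, colVals mat 1, colVals mat 2, colVals mat 3] := by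
  have hr : List.range 4 = [0, 1, 2, 3] := by decide
  simp only [linesB, hr, List.map_cons, List.map_nil, cellB_eq]
  rfl

theorem checkLines_eq (ls : List (List Int)) :
    checkLines ls =
      (if ∀ line ∈ ls, ((line.filter (fun v => v != 0)).Nodup) then 1 else 0) := by
  induction ls with
  | nil => simp [checkLines]
  | cons line rest ih =>
    by_cases hd : distinctB (line.filter (fun v => v != 0)) = true
    · rw [show checkLines (line :: rest) = checkLines rest from by
        simp [checkLines, hd], ih]
      have hnd := (distinctB_iff _).mp hd
      by_cases hall : ∀ l ∈ rest, ((l.filter (fun v => v != 0)).Nodup)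
      · rw [if_pos hall, if_pos (by intro l hl; rcases List.mem_cons.mp hl with rfl | h
                                    exacts [hnd, hall l h])]
      · rw [if_neg hall, if_neg (fun h => hall (fun l hl => h l (List.mem_cons_of_mem _ hl)))]
    · rw [show checkLines (line :: rest) = 0 from by simp [checkLines, hd]]
      rw [if_neg]
      intro h
      exact hd ((distinctB_iff _).mpr (h line (List.mem_cons_self)))

theorem recurr_alt_valid_pos (mat : List (List Int)) (hv : validBoard mat) :
    checkLines (linesB mat) = 1 := by
  rw [checkLines_eq, linesB_eq, if_pos]
  intro line hline
  unfold validBoard at hv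
  fin_cases hline
  · exact (hv 0 (by simp)).1
  · exact (hv 1 (by simp)).1
  · exact (hv 2 (by simp)).1
  · exact (hv 3 (by simp)).1
  · exact (hv 0 (by simp)).2
  · exact (hv 1 (by simp)).2
  · exact (hv 2 (by simp)).2
  · exact (hv 3 (by simp)).2

theorem recurr_alt_valid_neg (mat : List (List Int)) (hv : ¬ validBoard mat) :
    checkLines (linesB mat) = 0 := by
  rw [checkLines_eq, linesB_eq, if_neg]
  intro h
  apply hv
  intro k hk
  fin_cases hk
  · exact ⟨h _ (by simp), h _ (by simp)⟩
  · exact ⟨h _ (by simp), h _ (by simp)⟩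
  · exact ⟨h _ (by simp), h _ (by simp)⟩
  · exact ⟨h _ (by simp), h _ (by simp)⟩

-- ===== VERDICT (by name: the statement is the Claim_ definition above) =====
theorem recurr_spec : Claim_equal_recurr := by
  unfold Claim_equal_recurr
  intro mat m n _ hpre
  unfold Spec_recurr recurr recurr_alt
  by_cases hm : m = 4
  · rw [if_pos hm]
    rw [show (64 : Nat) = 63 + 1 from rfl]
    simp [recurrF, hm]
  · rw [if_neg hm]
    rcases hpre with h4 | ⟨hs, hrest⟩
    · exact absurd h4 hm
    by_cases hv : validBoard mat
    · have hranges : 0 ≤ m ∧ m ≤ 3 ∧ 0 ≤ n ∧ n ≤ 3 := by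
        rcases hrest with h | h
        · exact absurd hv h
        · exact h
      rw [recurr_alt_valid_pos mat hv]
      exact main 64 mat m n hs hv hranges.1 (by omega) hranges.2.2.1 hranges.2.2.2
        (by omega) (by omega)
    · rw [recurr_alt_valid_neg mat hv]
      rw [show (64 : Nat) = 63 + 1 from rfl]
      simp [recurrF, hm, isValid_eq_zero mat hv]
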